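-- pv_equiv track=rewrite | github.com/theCodePy/CTF | ctflearn/reverseengineering/Reverse_Me/find_flag.py | reverse_suffle
-- ===== SOURCE A (Python) =====
-- def reverse_suffle( block ):
--     suffled_ = [0] * len(block)
--     i =0
--     while True:
--         if i >= len(block) :
--             break
--         suffled_[i+1] = block[i]
--         i+=2
--     i=1
--     while True:
--         if i >= len(block) :
--             break
--         suffled_[i-1] = block[i]
--         i+=2
--     return suffled_
-- ===== SOURCE B (Python) =====
-- def reverse_suffle(block):
--     out = []
--     it = iter(block)
--     for a, b in zip(it, it):
--         out.append(b)
--         out.append(a)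
--     return out
-- ===== Notes on version B (the rewrite author's own statement) =====
-- stated objective: simpler
-- what changed: Replaces the preallocated zero list mutated by two strided index-writing while-loops with a single forward pass over the elements taken two at a time (zip of one iterator with itself), appending each pair swapped.
import Mathlib
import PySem

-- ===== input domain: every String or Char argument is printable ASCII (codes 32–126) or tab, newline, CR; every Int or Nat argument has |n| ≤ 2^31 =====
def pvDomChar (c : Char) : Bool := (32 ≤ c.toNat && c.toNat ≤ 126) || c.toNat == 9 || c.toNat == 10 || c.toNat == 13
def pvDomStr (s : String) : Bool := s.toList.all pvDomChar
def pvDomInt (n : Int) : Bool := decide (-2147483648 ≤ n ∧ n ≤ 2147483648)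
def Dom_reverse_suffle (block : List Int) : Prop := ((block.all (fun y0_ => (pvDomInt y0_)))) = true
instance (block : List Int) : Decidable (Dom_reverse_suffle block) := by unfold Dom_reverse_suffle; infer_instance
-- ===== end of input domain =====

-- B replaces A's preallocated zero list and two strided index-writing while-loops
-- with one forward pass over the elements two at a time, appending each pair swapped (objective: simpler).

-- ===== PORT A =====
-- first while-loop: while i < len(block): suffled_[i+1] = block[i]; i += 2
-- (List.set ignores an out-of-range index; Python raises IndexError there — those
--  inputs, odd-length blocks, are excluded by Pre_reverse_suffle)
def rsLoop1 (block s : List Int) (i : Nat) : List Int :=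
  if h : i ≥ block.length then s
  else rsLoop1 block (s.set (i + 1) (block.getD i 0)) (i + 2)
termination_by block.length - i
decreasing_by omega

-- second while-loop: while i < len(block): suffled_[i-1] = block[i]; i += 2
def rsLoop2 (block s : List Int) (i : Nat) : List Int :=
  if h : i ≥ block.length then s
  else rsLoop2 block (s.set (i - 1) (block.getD i 0)) (i + 2)
termination_by block.length - i
decreasing_by omega

def reverse_suffle (block : List Int) : List Int :=
  rsLoop2 block (rsLoop1 block (List.replicate block.length 0) 0) 1

-- ===== PORT B =====
-- for a, b in zip(it, it): out.append(b); out.append(a)  — consumes two elements per step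
def reverse_suffle_alt (block : List Int) : List Int :=
  match block with
  | a :: b :: rest => b :: a :: reverse_suffle_alt rest
  | _ => []

-- ===== PRECONDITION & SPEC =====
-- Pre_ excludes exactly the odd-length blocks, on which A raises IndexError
-- (the first loop writes suffled_[len(block)]).
def Pre_reverse_suffle (block : List Int) : Prop := block.length % 2 = 0
instance (block : List Int) : Decidable (Pre_reverse_suffle block) := by unfold Pre_reverse_suffle; infer_instance
def pvWitness_reverse_suffle : List Int := [1, 2, 3, 4]
def Spec_reverse_suffle (block : List Int) (out : List Int) : Prop := out = reverse_suffle_alt block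
instance (block : List Int) (out : List Int) : Decidable (Spec_reverse_suffle block out) := by unfold Spec_reverse_suffle; infer_instance

-- ===== CLAIM (what is proved, stated in full; the proofs are below) =====
def Claim_equal_reverse_suffle : Prop := ∀ (block : List Int), Dom_reverse_suffle block → Pre_reverse_suffle block → Spec_reverse_suffle block (reverse_suffle block)

-- ===== LEMMAS AND PROOFS =====

theorem rsLoop1_length (block : List Int) : ∀ s i, (rsLoop1 block s i).length = s.length := by
  intro s i
  induction s, i using rsLoop1.induct block with
  | case1 s i h => rw [rsLoop1]; simp [h]
  | case2 s i h ih => rw [rsLoop1]; simp [h]; simpa using ih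

theorem rsLoop2_length (block : List Int) : ∀ s i, (rsLoop2 block s i).length = s.length := by
  intro s i
  induction s, i using rsLoop2.induct block with
  | case1 s i h => rw [rsLoop2]; simp [h]
  | case2 s i h ih => rw [rsLoop2]; simp [h]; simpa using ih

theorem rsLoop1_get (block : List Int) : ∀ s i, s.length = block.length →
    ∀ j, j < block.length →
    (rsLoop1 block s i)[j]? =
      if i + 1 ≤ j ∧ (j - i) % 2 = 1 then block[j - 1]? else s[j]? := by
  intro s i
  induction s, i using rsLoop1.induct block with
  | case1 s i h =>
    intro hs j hj
    rw [rsLoop1, dif_pos h]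
    rw [if_neg]; omega
  | case2 s i h ih =>
    intro hs j hj
    rw [rsLoop1, dif_neg h]
    rw [ih (by simpa using hs) j hj]
    by_cases hji : j = i + 1
    · subst hji
      rw [if_neg (by omega), if_pos (by omega)]
      rw [List.getElem?_set_self (by omega)]
      have hi : i < block.length := by omega
      simp [List.getD_eq_getElem?_getD, List.getElem?_eq_getElem hi]
    · by_cases hc : i + 1 ≤ j ∧ (j - i) % 2 = 1
      · rw [if_pos (by omega), if_pos hc]
      · rw [if_neg (by omega), if_neg hc]
        rw [List.getElem?_set_ne (by omega)]

theorem rsLoop2_get (block : List Int) : ∀ s i, 1 ≤ i → s.length = block.length →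
    ∀ j, j < block.length →
    (rsLoop2 block s i)[j]? =
      if i ≤ j + 1 ∧ (j + 1 - i) % 2 = 0 ∧ j + 1 < block.length
      then block[j + 1]? else s[j]? := by
  intro s i
  induction s, i using rsLoop2.induct block with
  | case1 s i h =>
    intro hi1 hs j hj
    rw [rsLoop2, dif_pos h]
    rw [if_neg]; omega
  | case2 s i h ih =>
    intro hi1 hs j hj
    rw [rsLoop2, dif_neg h]
    rw [ih (by omega) (by simpa using hs) j hj]
    by_cases hji : j + 1 = i
    · obtain rfl : i = j + 1 := hji.symm
      rw [if_neg (by omega), if_pos ⟨by omega, by omega, by omega⟩]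
      simp only [Nat.add_sub_cancel]
      rw [List.getElem?_set_self (by omega)]
      simp [List.getD_eq_getElem?_getD, List.getElem?_eq_getElem (by omega : j + 1 < block.length)]
    · by_cases hc : i ≤ j + 1 ∧ (j + 1 - i) % 2 = 0 ∧ j + 1 < block.length
      · rw [if_pos (by omega), if_pos hc]
      · rw [if_neg (by omega), if_neg hc]
        rw [List.getElem?_set_ne (by omega)]

theorem alt_length (block : List Int) (h : block.length % 2 = 0) :
    (reverse_suffle_alt block).length = block.length := by
  induction block using reverse_suffle_alt.induct with
  | case1 a b rest ih =>
    simp only [reverse_suffle_alt, List.length_cons]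
    rw [ih (by simp only [List.length_cons] at h; omega)]
  | case2 bl hb =>
    match bl, hb with
    | [], _ => rfl
    | [a], hb => simp at h
    | a :: b :: r, hb => exact absurd rfl (hb a b r)

theorem alt_get (block : List Int) (h : block.length % 2 = 0) :
    ∀ j, j < block.length →
    (reverse_suffle_alt block)[j]? =
      if j % 2 = 0 then block[j + 1]? else block[j - 1]? := by
  induction block using reverse_suffle_alt.induct with
  | case1 a b rest ih =>
    intro j hj
    match j with
    | 0 => simp [reverse_suffle_alt]
    | 1 => simp [reverse_suffle_alt]
    | (k + 2) =>
      have hk : k < rest.length := by simp only [List.length_cons] at hj; omega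
      have ihk := ih (by simp only [List.length_cons] at h; omega) k hk
      show (b :: a :: reverse_suffle_alt rest)[k + 2]? = _
      rw [List.getElem?_cons_succ, List.getElem?_cons_succ, ihk]
      by_cases hp : k % 2 = 0
      · rw [if_pos hp, if_pos (by omega)]
        simp [List.getElem?_cons_succ]
      · obtain ⟨m, rfl⟩ : ∃ m, k = m + 1 := ⟨k - 1, by omega⟩
        rw [if_neg hp, if_neg (by omega)]
        simp [List.getElem?_cons_succ]
  | case2 bl hb =>
    match bl, hb with
    | [], _ => intro j hj; simp at hj
    | [a], hb => simp at h
    | a :: b :: r, hb => exact absurd rfl (hb a b r)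

-- ===== VERDICT (by name: the statement is the Claim_ definition above) =====
theorem reverse_suffle_spec : Claim_equal_reverse_suffle := by
  intro block _ hpre
  have hev : block.length % 2 = 0 := hpre
  unfold Spec_reverse_suffle reverse_suffle
  have hlen : (rsLoop1 block (List.replicate block.length 0) 0).length = block.length := by
    rw [rsLoop1_length]; simp
  apply List.ext_getElem?
  intro j
  by_cases hj : j < block.length
  · rw [rsLoop2_get block _ 1 (by omega) hlen j hj,
        rsLoop1_get block _ 0 (by simp) j hj,
        alt_get block hev j hj]
    by_cases hp : j % 2 = 0
    · rw [if_pos ⟨by omega, by omega, by omega⟩, if_pos hp]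
    · rw [if_neg (by omega), if_pos (by omega), if_neg hp]
  · have h1 : (rsLoop2 block (rsLoop1 block (List.replicate block.length 0) 0) 1).length = block.length := by
      rw [rsLoop2_length]; exact hlen
    have h2 := alt_length block hev
    rw [List.getElem?_eq_none (by omega), List.getElem?_eq_none (by omega)]
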